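-- pv_equiv track=rewrite | github.com/hakankoklu/advent-of-code | advent_of_code/2020/day06.py | get_group_answers2
-- ===== SOURCE A (Python) =====
-- from typing import List, Set
--
-- def get_group_answers2(answers: List[str]) -> Set[str]:
--     qs = 'qwertyuiopasdfghjklzxcvbnm'
--     result = set()
--     for q in qs:
--         yes = True
--         for answer in answers:
--             if q not in answer:
--                 yes = False
--                 break
--         if yes:
--             result.add(q)
--     return result
-- ===== SOURCE B (Python) =====
-- def get_group_answers2(answers):
--     n = len(answers)
--     counts = {}
--     for answer in answers:
--         for c in set(answer):
--             counts[c] = counts.get(c, 0) + 1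
--     return {q for q in 'qwertyuiopasdfghjklzxcvbnm' if counts.get(q, 0) == n}
-- ===== Notes on version B (the rewrite author's own statement) =====
-- stated objective: alternative
-- what changed: Replaces A's per-letter rescan of all answers (with early break) by one pass building a letter->answer-count table (set per answer) plus one alphabet pass keeping letters whose count equals len(answers).
import Mathlib
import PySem

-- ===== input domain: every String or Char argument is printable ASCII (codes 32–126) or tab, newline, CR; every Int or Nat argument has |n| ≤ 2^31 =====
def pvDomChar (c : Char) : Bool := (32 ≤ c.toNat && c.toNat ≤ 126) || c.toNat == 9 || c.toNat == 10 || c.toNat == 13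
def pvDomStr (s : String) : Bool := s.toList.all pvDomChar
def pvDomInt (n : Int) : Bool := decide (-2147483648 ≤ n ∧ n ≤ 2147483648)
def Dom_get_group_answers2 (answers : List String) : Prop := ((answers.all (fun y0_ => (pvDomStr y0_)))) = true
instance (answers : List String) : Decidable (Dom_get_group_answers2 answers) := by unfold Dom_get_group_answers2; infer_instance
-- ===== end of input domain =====

-- B is an alternative algorithm: one counting pass over the answers plus one alphabet pass, instead of A's per-letter rescan.

-- ===== PORT A =====
-- inner 'for answer in answers: if q not in answer: yes = False; break'
def pvYesLoop (q : Char) : List String → Bool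
  | [] => true
  | a :: rest => if ¬ PySem.Str.isIn (String.singleton q) a then false else pvYesLoop q rest

def get_group_answers2 (answers : List String) : List String :=
  let qs := "qwertyuiopasdfghjklzxcvbnm"
  qs.toList.foldl (fun result q =>
    if pvYesLoop q answers then PySem.Set.add result (String.singleton q) else result)
    PySem.Set.empty

-- ===== PORT B =====
def get_group_answers2_alt (answers : List String) : List String :=
  let n : Int := answers.length
  let counts : PySem.Dict Char Int :=
    answers.foldl (fun d answer =>
      (PySem.Set.ofList answer.toList).foldl (fun d c => d.modify c 0 (· + 1)) d)
      PySem.Dict.empty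
  ("qwertyuiopasdfghjklzxcvbnm".toList).foldl (fun s q =>
    if counts.getD q 0 = n then PySem.Set.add s (String.singleton q) else s)
    PySem.Set.empty

-- ===== PRECONDITION & SPEC =====
def Spec_get_group_answers2 (answers : List String) (out : List String) : Prop := out = get_group_answers2_alt answers
instance (answers : List String) (out : List String) : Decidable (Spec_get_group_answers2 answers out) := by unfold Spec_get_group_answers2; infer_instance

-- ===== CLAIM (what is proved, stated in full; the proofs are below) =====
def Claim_equal_get_group_answers2 : Prop := ∀ (answers : List String), Dom_get_group_answers2 answers → Spec_get_group_answers2 answers (get_group_answers2 answers)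

-- ===== LEMMAS AND PROOFS =====

-- A's inner break-loop decides "q occurs in every answer"
lemma pvYesLoop_eq_all (q : Char) (answers : List String) :
    pvYesLoop q answers = answers.all (fun a => decide (q ∈ a.toList)) := by
  induction answers with
  | nil => rfl
  | cons a rest ih =>
      by_cases h : q ∈ a.toList <;>
        simp [pvYesLoop, ih, h, PySem.Chars.isIn_iff_infix, List.singleton_infix_iff]

-- B's counting pass: the table maps q to the number of answers containing q
lemma pvCounts_getD (q : Char) (answers : List String) (d : PySem.Dict Char Int) :
    (answers.foldl (fun d answer =>
      (PySem.Set.ofList answer.toList).foldl (fun d c => d.modify c 0 (· + 1)) d) d).getD q 0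
    = d.getD q 0 + (answers.countP (fun a => decide (q ∈ a.toList)) : Int) := by
  induction answers generalizing d with
  | nil => simp
  | cons a rest ih =>
      rw [List.foldl_cons, ih, PySem.Dict.getD_foldl_modify_add_one]
      have hcnt : ((PySem.Set.ofList a.toList).count q : Int)
          = if q ∈ a.toList then 1 else 0 := by
        by_cases h : q ∈ a.toList
        · simp [h]
        · have : q ∉ PySem.Set.ofList a.toList := fun hm => h ((PySem.Set.mem_ofList _ _).1 hm)
          simp [h, List.count_eq_zero_of_not_mem this]
      rw [hcnt]
      by_cases h : q ∈ a.toList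
      · simp [h]; ring
      · simp [h]

-- the two selection conditions agree letter by letter
lemma pvCond_eq (q : Char) (answers : List String) :
    (pvYesLoop q answers = true)
      ↔ ((answers.foldl (fun d answer =>
            (PySem.Set.ofList answer.toList).foldl (fun d c => d.modify c 0 (· + 1)) d)
            PySem.Dict.empty).getD q 0 = (answers.length : Int)) := by
  rw [pvYesLoop_eq_all, pvCounts_getD]
  have h1 : (PySem.Dict.empty : PySem.Dict Char Int).getD q 0 = 0 := rfl
  rw [h1, zero_add]
  have hc := List.countP_eq_length (p := fun a => decide (q ∈ a.toList)) (l := answers)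
  constructor
  · intro h
    exact_mod_cast congrArg (fun m : Nat => (m : Int)) (hc.2 (List.all_eq_true.1 h))
  · intro h
    exact List.all_eq_true.2 (hc.1 (by exact_mod_cast h))

-- ===== VERDICT (by name: the statement is the Claim_ definition above) =====
theorem get_group_answers2_spec : Claim_equal_get_group_answers2 := by
  intro answers _
  unfold Spec_get_group_answers2 get_group_answers2 get_group_answers2_alt
  show List.foldl _ PySem.Set.empty ("qwertyuiopasdfghjklzxcvbnm".toList)
      = List.foldl _ PySem.Set.empty ("qwertyuiopasdfghjklzxcvbnm".toList)
  refine List.foldl_ext _ _ PySem.Set.empty ?_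
  intro s q _
  by_cases h : pvYesLoop q answers = true
  · rw [if_pos h, if_pos ((pvCond_eq q answers).1 h)]
  · rw [if_neg h, if_neg (fun hc => h ((pvCond_eq q answers).2 hc))]
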